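-- pv_equiv track=rewrite | github.com/birc-gsa/cigar-python | src/align.py | local_align
-- ===== SOURCE A (Python) =====
-- def local_align(p: str, x: str, i: int, edits: str) -> tuple[str, str]:
--     """Align two sequences from a sequence of edits.
--
--     Args:
--         p (str): The read string we have mapped against x
--         x (str): The longer string we have mapped against
--         i (int): The location where we have an approximative match
--         edits (str): The list of edits to apply, given as a string
--
--     Returns:
--         tuple[str, str]: The two rows in the pairwise alignment
--
--     >>> local_align("ACCACAGTCATA", "GTACAGAGTACAAA", 2, "MDMMMMMMIMMMM")
--     ('ACCACAGT-CATA', 'A-CAGAGTACAAA')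
--
--     """
--     j, k = 0, 0
--     row_p, row_q = [], []
--     for op in edits:
--         match op:
--             case 'M':
--                 row_p.append(p[j])
--                 row_q.append(x[i+k])
--                 j += 1
--                 k += 1
--             case 'D':
--                 row_p.append(p[j])
--                 row_q.append('-')
--                 j += 1
--             case 'I':
--                 row_p.append('-')
--                 row_q.append(x[i+k])
--                 k += 1
--
--     return "".join(row_p), "".join(row_q)
-- ===== SOURCE B (Python) =====
-- def local_align(p: str, x: str, i: int, edits: str) -> tuple[str, str]:
--     # Build the two alignment rows in two separate passes over edits.
--     row_p = []
--     j = 0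
--     for op in edits:
--         if op == 'M' or op == 'D':
--             row_p.append(p[j])
--             j += 1
--         elif op == 'I':
--             row_p.append('-')
--     row_q = []
--     k = 0
--     for op in edits:
--         if op == 'M' or op == 'I':
--             row_q.append(x[i + k])
--             k += 1
--         elif op == 'D':
--             row_q.append('-')
--     return "".join(row_p), "".join(row_q)
-- ===== Notes on version B (the rewrite author's own statement) =====
-- stated objective: alternative
-- what changed: Replaces the single interleaved loop carrying four pieces of state (j, k, row_p, row_q) by two independent single-purpose passes over edits, each building one alignment row with its own index.
import Mathlib
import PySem

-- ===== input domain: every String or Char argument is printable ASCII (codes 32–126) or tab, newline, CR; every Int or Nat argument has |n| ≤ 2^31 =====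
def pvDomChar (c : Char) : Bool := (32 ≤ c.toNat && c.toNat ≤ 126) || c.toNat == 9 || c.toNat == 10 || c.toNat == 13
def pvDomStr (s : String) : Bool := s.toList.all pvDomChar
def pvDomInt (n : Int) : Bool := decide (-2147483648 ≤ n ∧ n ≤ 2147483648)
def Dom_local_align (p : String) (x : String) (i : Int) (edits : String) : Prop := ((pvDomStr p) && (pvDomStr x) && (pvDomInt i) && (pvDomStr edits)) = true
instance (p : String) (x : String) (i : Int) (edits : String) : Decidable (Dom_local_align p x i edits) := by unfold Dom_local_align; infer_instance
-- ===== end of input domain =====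

-- B builds the two alignment rows in two separate single-purpose passes over `edits`
-- instead of A's one interleaved loop carrying four pieces of state (alternative decomposition).


-- ===== PORT A =====
-- A's single loop over edits, carrying (j, k, row_p, row_q); out-of-range lookups
-- (IndexError in Python) are excluded by Pre_ below, the '?'.getD ' ' is never hit on Pre_.
def pvStepA (p : String) (x : String) (i : Int)
    (s : Int × Int × List Char × List Char) (op : Char) : Int × Int × List Char × List Char :=
  let (j, k, rp, rq) := s
  if op = 'M' then
    (j + 1, k + 1, rp ++ [(PySem.Str.pyGet? p j).getD ' '], rq ++ [(PySem.Str.pyGet? x (i + k)).getD ' '])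
  else if op = 'D' then
    (j + 1, k, rp ++ [(PySem.Str.pyGet? p j).getD ' '], rq ++ ['-'])
  else if op = 'I' then
    (j, k + 1, rp ++ ['-'], rq ++ [(PySem.Str.pyGet? x (i + k)).getD ' '])
  else s

def local_align (p : String) (x : String) (i : Int) (edits : String) : String × String :=
  let st := edits.toList.foldl (pvStepA p x i) (0, 0, [], [])
  (String.mk st.2.2.1, String.mk st.2.2.2)

-- ===== PORT B =====
-- B: first pass builds row_p with index j; second pass builds row_q with index k.
def pvStepP (p : String) (s : Int × List Char) (op : Char) : Int × List Char :=
  let (j, rp) := s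
  if op = 'M' ∨ op = 'D' then (j + 1, rp ++ [(PySem.Str.pyGet? p j).getD ' '])
  else if op = 'I' then (j, rp ++ ['-'])
  else s

def pvStepQ (x : String) (i : Int) (s : Int × List Char) (op : Char) : Int × List Char :=
  let (k, rq) := s
  if op = 'M' ∨ op = 'I' then (k + 1, rq ++ [(PySem.Str.pyGet? x (i + k)).getD ' '])
  else if op = 'D' then (k, rq ++ ['-'])
  else s

def local_align_alt (p : String) (x : String) (i : Int) (edits : String) : String × String :=
  let sp := edits.toList.foldl (pvStepP p) (0, [])
  let sq := edits.toList.foldl (pvStepQ x i) (0, [])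
  (String.mk sp.2, String.mk sq.2)

-- ===== PRECONDITION & SPEC =====
-- Pre_ excludes exactly the inputs on which Python A raises IndexError: some used index
-- into p (the count of M/D edits exceeds |p|) or into x (i+k outside Python's valid
-- range, negative indices wrapping) is out of range. B raises there too.
def Pre_local_align (p : String) (x : String) (i : Int) (edits : String) : Prop :=
  edits.toList.count 'M' + edits.toList.count 'D' ≤ p.toList.length ∧
  (edits.toList.count 'M' + edits.toList.count 'I' = 0 ∨
    (-(x.toList.length : Int) ≤ i ∧
      i + (edits.toList.count 'M' + edits.toList.count 'I' : Int) ≤ (x.toList.length : Int)))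
instance (p : String) (x : String) (i : Int) (edits : String) : Decidable (Pre_local_align p x i edits) := by unfold Pre_local_align; infer_instance

def pvWitness_local_align : String × String × Int × String :=
  ("ACCACAGTCATA", "GTACAGAGTACAAA", 2, "MDMMMMMMIMMMM")

def Spec_local_align (p : String) (x : String) (i : Int) (edits : String) (out : String × String) : Prop := out = local_align_alt p x i edits
instance (p : String) (x : String) (i : Int) (edits : String) (out : String × String) : Decidable (Spec_local_align p x i edits out) := by unfold Spec_local_align; infer_instance

-- ===== CLAIM (what is proved, stated in full; the proofs are below) =====
def Claim_equal_local_align : Prop := ∀ (p : String) (x : String) (i : Int) (edits : String), Dom_local_align p x i edits → Pre_local_align p x i edits → Spec_local_align p x i edits (local_align p x i edits)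

-- ===== LEMMAS AND PROOFS =====

-- The interleaved fold is the pair of the two single-purpose folds, for any start state.
theorem pv_fold_split (p : String) (x : String) (i : Int) :
    ∀ (l : List Char) (j k : Int) (rp rq : List Char),
      l.foldl (pvStepA p x i) (j, k, rp, rq) =
        ((l.foldl (pvStepP p) (j, rp)).1,
         (l.foldl (pvStepQ x i) (k, rq)).1,
         (l.foldl (pvStepP p) (j, rp)).2,
         (l.foldl (pvStepQ x i) (k, rq)).2) := by
  intro l
  induction l with
  | nil => intro j k rp rq; simp
  | cons op t ih =>
    intro j k rp rq
    simp only [List.foldl_cons]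
    by_cases hM : op = 'M'
    · simp [pvStepA, pvStepP, pvStepQ, hM, ih]
    · by_cases hD : op = 'D'
      · simp [pvStepA, pvStepP, pvStepQ, hM, hD, ih]
      · by_cases hI : op = 'I'
        · simp [pvStepA, pvStepP, pvStepQ, hM, hD, hI, ih]
        · simp [pvStepA, pvStepP, pvStepQ, hM, hD, hI, ih]

-- ===== VERDICT (by name: the statement is the Claim_ definition above) =====
theorem local_align_spec : Claim_equal_local_align := by
  intro p x i edits _ _
  unfold Spec_local_align local_align local_align_alt
  simp [pv_fold_split]
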